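-- pv_equiv track=rewrite | github.com/iimmuunnee/baekjoon-programmers | 프로그래머스/1/340198. ［PCCE 기출문제］ 10번 ／ 공원/［PCCE 기출문제］ 10번 ／ 공원.py | solution
-- ===== SOURCE A (Python) =====
-- def solution(mats, park):
--     answer = 0
--     mats.sort(reverse=True)
--     n = len(park)
--     m = len(park[0])
--
--     for size in mats:
--         for i in range(n):
--             for j in range(m):
--                 if i + size > n or j + size > m:
--                     continue
--
--                 ok = True
--                 for x in range(i, i + size):
--                     for y in range(j, j + size):
--                         if park[x][y] != "-1":
--                             ok = False
--                             break
--                     if not ok: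
--                         break
--
--                 if ok:
--                     return size
--     return -1
--
--
--
--
--     return answer
-- ===== SOURCE B (Python) =====
-- def solution(mats, park):
--     # Equivalence is about the return value only: A sorts `mats` in place, B does not mutate it.
--     n = len(park)
--     m = len(park[0])
--     if m == 0:
--         return -1
--     # Largest-empty-square DP: L = side of the biggest all-"-1" square in the park.
--     best = 0
--     prev = [0] * m
--     for row in park:
--         cur = []
--         diag = 0
--         left = 0
--         for j in range(m):
--             up = prev[j]
--             if row[j] == "-1":
--                 v = 1 + min(up, left, diag)
--                 if v > best:
--                     best = v
--             else:
--                 v = 0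
--             cur.append(v)
--             diag = up
--             left = v
--         prev = cur
--     return max((s for s in mats if s <= best), default=-1)
-- ===== Notes on version B (the rewrite author's own statement) =====
-- stated objective: faster
-- what changed: Replaces the per-mat brute-force scan (for every mat size, every position, re-checking the whole size x size square) by one largest-empty-square dynamic-programming pass over the park followed by a single max over the mats that fit; B also does not mutate mats (A sorts it in place).
-- outside the precondition, e.g. on solution([], [['x'], []]): A returns -1, B raises IndexError
import Mathlib
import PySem

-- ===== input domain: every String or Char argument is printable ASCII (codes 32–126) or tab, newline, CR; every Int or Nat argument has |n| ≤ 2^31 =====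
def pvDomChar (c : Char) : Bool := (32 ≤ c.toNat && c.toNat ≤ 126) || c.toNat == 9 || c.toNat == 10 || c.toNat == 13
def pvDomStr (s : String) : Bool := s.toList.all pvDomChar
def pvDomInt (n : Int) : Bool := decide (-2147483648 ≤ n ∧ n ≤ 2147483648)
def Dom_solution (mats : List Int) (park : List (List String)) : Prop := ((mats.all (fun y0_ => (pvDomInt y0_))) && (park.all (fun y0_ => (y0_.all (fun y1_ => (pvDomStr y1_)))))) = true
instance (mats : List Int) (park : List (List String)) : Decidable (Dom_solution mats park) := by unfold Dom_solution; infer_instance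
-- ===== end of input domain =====

-- B replaces A's per-mat brute-force square scans by one largest-empty-square DP pass plus a
-- single max over the fitting mats (objective: faster). A sorts `mats` in place; the equivalence
-- proved here is about the return value only (B does not mutate its arguments).

-- ===== PORT A =====
-- park[x][y] ported as pyGetD with default ""; exact under Pre_solution (all touched indices in range).
def pvCellA (park : List (List String)) (x y : Int) : String :=
  PySem.List.pyGetD (PySem.List.pyGetD park x []) y ""

-- the `for i: for j: … continue … ok-check … return` scan for one mat size (early exits = any/all)
def pvScanA (park : List (List String)) (n m size : Int) : Bool :=
  (PySem.List.pyRange 0 n 1).any (fun i =>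
    (PySem.List.pyRange 0 m 1).any (fun j =>
      !(decide (i + size > n) || decide (j + size > m)) &&
      (PySem.List.pyRange i (i + size) 1).all (fun x =>
        (PySem.List.pyRange j (j + size) 1).all (fun y =>
          pvCellA park x y == "-1"))))

def solution (mats : List Int) (park : List (List String)) : Int :=
  let n : Int := park.length
  let m : Int := ((park.headD []).length : Int)   -- len(park[0]); Pre_solution excludes park = []
  match (PySem.List.sorted mats (fun x => x) true).findSome? (fun size =>
      if pvScanA park n m size then some size else none) with
  | some s => s
  | none => -1

-- ===== PORT B =====
-- inner loop of Source B: walk prev (length m), j the column index, carrying diag/left/best and building cur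
def pvRowStep (row : List String) : List Int → Int → Int → Int → Int → List Int → (List Int × Int)
  | [], _, _, _, best, cur => (cur, best)
  | up :: rest, j, diag, left, best, cur =>
    if PySem.List.pyGetD row j "" == "-1" then
      let v := 1 + min up (min left diag)
      pvRowStep row rest (j + 1) up v (if v > best then v else best) (cur ++ [v])
    else
      pvRowStep row rest (j + 1) up 0 best (cur ++ [0])

def solution_alt (mats : List Int) (park : List (List String)) : Int :=
  let m : Nat := (park.headD []).length           -- len(park[0]); Pre_solution excludes park = []
  if m = 0 then -1
  else
    let st := park.foldl (fun (st : List Int × Int) row => pvRowStep row st.1 0 0 0 st.2 [])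
                         (List.replicate m 0, 0)
    match PySem.List.max? (mats.filter (fun s => decide (s ≤ st.2))) (fun x => x) with
    | some v => v
    | none => -1

-- ===== PRECONDITION & SPEC =====
-- Pre_ excludes the empty park and parks with a row shorter than the first row, on which the
-- Python A can raise IndexError (park[0] / park[x][y] out of range).
def Pre_solution (mats : List Int) (park : List (List String)) : Prop :=
  park ≠ [] ∧ ∀ row ∈ park, (park.headD []).length ≤ row.length
instance (mats : List Int) (park : List (List String)) : Decidable (Pre_solution mats park) := by
  unfold Pre_solution; infer_instance

def pvWitness_solution : List Int × List (List String) := ([2, 1], [["-1", "-1"], ["-1", "-1"]])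

def Spec_solution (mats : List Int) (park : List (List String)) (out : Int) : Prop := out = solution_alt mats park
instance (mats : List Int) (park : List (List String)) (out : Int) : Decidable (Spec_solution mats park out) := by unfold Spec_solution; infer_instance

-- ===== CLAIM (what is proved, stated in full; the proofs are below) =====
def Claim_equal_solution : Prop := ∀ (mats : List Int) (park : List (List String)), Dom_solution mats park → Pre_solution mats park → Spec_solution mats park (solution mats park)

-- ===== LEMMAS AND PROOFS =====

-- the (total) cell-emptiness test both ports reduce to
def pvC (park : List (List String)) (i j : Nat) : Bool := (park.getD i []).getD j "" == "-1"

-- dp value, padded: pvD park (i+1) (j+1) = side of the largest all-empty square whose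
-- bottom-right corner is cell (i, j); pvD park 0 _ = pvD park _ 0 = 0
def pvD (park : List (List String)) : Nat → Nat → Nat
  | 0, _ => 0
  | _ + 1, 0 => 0
  | i + 1, j + 1 =>
    if pvC park i j then
      1 + min (pvD park i (j + 1)) (min (pvD park (i + 1) j) (pvD park i j))
    else 0
termination_by i j => (i, j)

-- characterization of pvD: s fits as a bottom-right-cornered empty square at (i, j)
theorem pvD_zero_left (park : List (List String)) : ∀ b, pvD park 0 b = 0 :=
  fun b => by rw [pvD]

theorem pvD_zero_right (park : List (List String)) : ∀ a, pvD park (a + 1) 0 = 0 :=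
  fun a => by rw [pvD]

theorem pvD_succ_succ (park : List (List String)) (a b : Nat) :
    pvD park (a + 1) (b + 1) = if pvC park a b then
      1 + min (pvD park a (b + 1)) (min (pvD park (a + 1) b) (pvD park a b)) else 0 := by
  rw [pvD]

theorem pvD_ge_iff (park : List (List String)) :
    ∀ (s i j : Nat), s ≤ pvD park (i + 1) (j + 1) ↔
      (s ≤ i + 1 ∧ s ≤ j + 1 ∧ ∀ x < s, ∀ y < s, pvC park (i - x) (j - y) = true) := by
  intro s
  induction s with
  | zero => intro i j; simp
  | succ s ih =>
    intro i j
    rw [pvD_succ_succ]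
    rcases hc : pvC park i j with _ | _
    · rw [if_neg (by simp)]
      constructor
      · intro h; omega
      · rintro ⟨-, -, h⟩
        have h0 := h 0 (by omega) 0 (by omega)
        simp only [Nat.sub_zero] at h0
        rw [hc] at h0; exact absurd h0 (by simp)
    · rw [if_pos rfl]
      rcases i with _ | i' <;> rcases j with _ | j'
      · rw [pvD_zero_left, pvD_zero_right, pvD_zero_left]
        constructor
        · intro h
          have hs0 : s = 0 := by omega
          subst hs0
          refine ⟨by omega, by omega, ?_⟩
          intro x hx y hy
          have hx0 : x = 0 := by omega
          have hy0 : y = 0 := by omega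
          subst hx0; subst hy0; simpa using hc
        · rintro ⟨h1, h2, -⟩; omega
      · rw [pvD_zero_left, pvD_zero_left]
        constructor
        · intro h
          have hs0 : s = 0 := by omega
          subst hs0
          refine ⟨by omega, by omega, ?_⟩
          intro x hx y hy
          have hx0 : x = 0 := by omega
          have hy0 : y = 0 := by omega
          subst hx0; subst hy0; simpa using hc
        · rintro ⟨h1, h2, -⟩; omega
      · rw [pvD_zero_right, pvD_zero_right park i']
        constructor
        · intro h
          have hs0 : s = 0 := by omega
          subst hs0
          refine ⟨by omega, by omega, ?_⟩
          intro x hx y hy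
          have hx0 : x = 0 := by omega
          have hy0 : y = 0 := by omega
          subst hx0; subst hy0; simpa using hc
        · rintro ⟨h1, h2, -⟩; omega
      · have hsplit : s + 1 ≤ 1 + min (pvD park (i' + 1) (j' + 1 + 1))
            (min (pvD park (i' + 1 + 1) (j' + 1)) (pvD park (i' + 1) (j' + 1))) ↔
            s ≤ pvD park (i' + 1) (j' + 1 + 1) ∧ s ≤ pvD park (i' + 1 + 1) (j' + 1) ∧
            s ≤ pvD park (i' + 1) (j' + 1) := by omega
        rw [hsplit, ih i' (j' + 1), ih (i' + 1) j', ih i' j']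
        constructor
        · rintro ⟨⟨hA1, hA2, hA3⟩, ⟨hB1, hB2, hB3⟩, ⟨hC1, hC2, hC3⟩⟩
          refine ⟨by omega, by omega, ?_⟩
          intro x hx y hy
          rcases Nat.eq_zero_or_pos x with hx0 | hx1
          · rcases Nat.eq_zero_or_pos y with hy0 | hy1
            · subst hx0; subst hy0; simpa using hc
            · have h := hB3 0 (by omega) (y - 1) (by omega)
              have e1 : i' + 1 - x = i' + 1 - 0 := by omega
              have e2 : j' + 1 - y = j' - (y - 1) := by omega
              rw [e1, e2]; exact h
          · rcases Nat.eq_zero_or_pos y with hy0 | hy1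
            · have h := hA3 (x - 1) (by omega) 0 (by omega)
              have e1 : i' + 1 - x = i' - (x - 1) := by omega
              have e2 : j' + 1 - y = j' + 1 - 0 := by omega
              rw [e1, e2]; exact h
            · have h := hC3 (x - 1) (by omega) (y - 1) (by omega)
              have e1 : i' + 1 - x = i' - (x - 1) := by omega
              have e2 : j' + 1 - y = j' - (y - 1) := by omega
              rw [e1, e2]; exact h
        · rintro ⟨h1, h2, h3⟩
          refine ⟨⟨by omega, by omega, ?_⟩, ⟨by omega, by omega, ?_⟩, by omega, by omega, ?_⟩
          · intro x hx y hy
            have h := h3 (x + 1) (by omega) y (by omega)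
            have e1 : i' - x = i' + 1 - (x + 1) := by omega
            have e2 : j' + 1 - y = j' + 1 - y := rfl
            rw [e1]; exact h
          · intro x hx y hy
            have h := h3 x (by omega) (y + 1) (by omega)
            have e2 : j' - y = j' + 1 - (y + 1) := by omega
            rw [e2]; exact h
          · intro x hx y hy
            have h := h3 (x + 1) (by omega) (y + 1) (by omega)
            have e1 : i' - x = i' + 1 - (x + 1) := by omega
            have e2 : j' - y = j' + 1 - (y + 1) := by omega
            rw [e1, e2]; exact h

-- row-level max accumulator
def pvRowMax (park : List (List String)) (m r : Nat) (b : Int) : Int :=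
  (List.range m).foldl (fun a t => max a (pvD park (r + 1) (t + 1) : Int)) b

def pvGridMax (park : List (List String)) (m : Nat) (b : Int) (rs : List Nat) : Int :=
  rs.foldl (fun acc r => pvRowMax park m r acc) b

theorem pvRowStep_spec (park : List (List String)) (r : Nat) :
    ∀ (k jn : Nat) (b : Int) (cur : List Int), 0 ≤ b →
      pvRowStep (park.getD r []) ((List.range k).map (fun t => (pvD park r (jn + t + 1) : Int)))
        (jn : Int) (pvD park r jn : Int) (pvD park (r + 1) jn : Int) b cur
      = (cur ++ (List.range k).map (fun t => (pvD park (r + 1) (jn + t + 1) : Int)),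
         (List.range k).foldl (fun a t => max a (pvD park (r + 1) (jn + t + 1) : Int)) b) := by
  intro k
  induction k with
  | zero => intro jn b cur hb; simp [pvRowStep]
  | succ k ih =>
    intro jn b cur hb
    rw [List.range_succ_eq_map]
    simp only [List.map_cons, List.map_map, List.foldl_cons, List.foldl_map,
      Function.comp_def, Nat.succ_eq_add_one, Nat.add_zero]
    have hre : ∀ t : Nat, jn + (t + 1) + 1 = (jn + 1) + t + 1 := fun t => by omega
    simp only [hre]
    simp only [pvRowStep, PySem.List.pyGetD_natCast]
    have hcnd : ((park.getD r []).getD jn "" == "-1") = pvC park r jn := rfl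
    rw [hcnd]
    have hcast : ((jn : Int) + 1) = ((jn + 1 : Nat) : Int) := by push_cast; ring
    by_cases hc : pvC park r jn = true
    · rw [if_pos hc]
      have hv1 : pvD park (r + 1) (jn + 1)
          = 1 + min (pvD park r (jn + 1)) (min (pvD park (r + 1) jn) (pvD park r jn)) := by
        rw [pvD_succ_succ, if_pos hc]
      have hvc : (1 : Int) + min ((pvD park r (jn + 1) : Nat) : Int)
            (min ((pvD park (r + 1) jn : Nat) : Int) ((pvD park r jn : Nat) : Int))
          = ((pvD park (r + 1) (jn + 1) : Nat) : Int) := by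
        rw [hv1]; push_cast; ring_nf
      rw [hvc]
      have hmax : (if ((pvD park (r + 1) (jn + 1) : Nat) : Int) > b then
            ((pvD park (r + 1) (jn + 1) : Nat) : Int) else b)
          = max b ((pvD park (r + 1) (jn + 1) : Nat) : Int) := by
        by_cases hvb : ((pvD park (r + 1) (jn + 1) : Nat) : Int) > b
        · rw [if_pos hvb, max_eq_right hvb.le]
        · rw [if_neg hvb, max_eq_left (not_lt.mp hvb)]
      rw [hmax, hcast, ih (jn + 1) _ _ (le_trans hb (le_max_left _ _))]
      simp [List.append_assoc]
    · rw [if_neg hc]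
      have hv0 : pvD park (r + 1) (jn + 1) = 0 := by
        rw [pvD_succ_succ, if_neg hc]
      have h0c : (0 : Int) = ((pvD park (r + 1) (jn + 1) : Nat) : Int) := by rw [hv0]; rfl
      have hmb : max b ((pvD park (r + 1) (jn + 1) : Nat) : Int) = b := by
        rw [hv0]; simpa using hb
      rw [hcast, h0c, hmb]
      rw [ih (jn + 1) b (cur ++ [((pvD park (r + 1) (jn + 1) : Nat) : Int)]) hb]
      simp [List.append_assoc]

theorem pvFold_spec (park : List (List String)) (m : Nat) :
    ∀ (rows : List (List String)) (r : Nat) (b : Int), 0 ≤ b → park.drop r = rows →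
      rows.foldl (fun (st : List Int × Int) row => pvRowStep row st.1 0 0 0 st.2 [])
        ((List.range m).map (fun t => (pvD park r (t + 1) : Int)), b)
      = ((List.range m).map (fun t => (pvD park (r + rows.length) (t + 1) : Int)),
         pvGridMax park m b (List.range' r rows.length)) := by
  intro rows
  induction rows with
  | nil => intro r b hb hdrop; simp [pvGridMax]
  | cons row rest ih =>
    intro r b hb hdrop
    have hhead : park.getD r [] = row := by
      have h1 : park[r]? = some row := by
        rw [← List.head?_drop, hdrop]; rfl
      simp [List.getD, h1]
    have hdrop' : park.drop (r + 1) = rest := by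
      have h2 := congrArg List.tail hdrop
      rwa [List.tail_drop] at h2
    simp only [List.foldl_cons]
    have hz : ∀ a : Nat, pvD park a 0 = 0 := by
      intro a; rcases a with _ | a'
      · exact pvD_zero_left park 0
      · exact pvD_zero_right park a'
    have hstep := pvRowStep_spec park r m 0 b [] hb
    simp only [Nat.zero_add, hz, Nat.cast_zero, List.nil_append] at hstep
    rw [hhead] at hstep
    rw [hstep]
    have hb' : 0 ≤ (List.range m).foldl (fun a t => max a (pvD park (r + 1) (t + 1) : Int)) b :=
      le_trans hb (PySem.List.le_foldl_max_int (List.range m) _ b).1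
    rw [ih (r + 1) _ hb' hdrop']
    have hlen : r + 1 + rest.length = r + (row :: rest).length := by
      simp [List.length_cons]; omega
    rw [hlen]
    have hrange : List.range' r (row :: rest).length = r :: List.range' (r + 1) rest.length := by
      simp [List.length_cons, List.range'_succ]
    rw [hrange]
    rfl

theorem le_pvGridMax (park : List (List String)) (m : Nat) :
    ∀ (rs : List Nat) (b : Int), b ≤ pvGridMax park m b rs := by
  intro rs
  induction rs with
  | nil => intro b; exact le_refl b
  | cons r rs ih =>
    intro b
    exact le_trans (PySem.List.le_foldl_max_int (List.range m) _ b).1 (ih _)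

theorem pvGridMax_ub (park : List (List String)) (m : Nat) :
    ∀ (rs : List Nat) (b : Int), ∀ r ∈ rs, ∀ t < m,
      (pvD park (r + 1) (t + 1) : Int) ≤ pvGridMax park m b rs := by
  intro rs
  induction rs with
  | nil => intro b r hr; exact absurd hr (List.not_mem_nil)
  | cons r' rs ih =>
    intro b r hr t ht
    rcases List.mem_cons.mp hr with rfl | hmem
    · refine le_trans ?_ (le_pvGridMax park m rs _)
      exact (PySem.List.le_foldl_max_int (List.range m) _ b).2 t (List.mem_range.mpr ht)
    · exact ih _ r hmem t ht

theorem pvGridMax_mem (park : List (List String)) (m : Nat) :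
    ∀ (rs : List Nat) (b : Int), pvGridMax park m b rs = b ∨
      ∃ r ∈ rs, ∃ t < m, pvGridMax park m b rs = (pvD park (r + 1) (t + 1) : Int) := by
  intro rs
  induction rs with
  | nil => intro b; left; rfl
  | cons r' rs ih =>
    intro b
    have hrow : pvRowMax park m r' b = b ∨
        ∃ t < m, pvRowMax park m r' b = (pvD park (r' + 1) (t + 1) : Int) := by
      rw [show pvRowMax park m r' b
          = ((List.range m).map (fun t => (pvD park (r' + 1) (t + 1) : Int))).foldl max b from by
        unfold pvRowMax; rw [List.foldl_map]]
      rcases PySem.List.foldl_max_mem ((List.range m).map (fun t => (pvD park (r' + 1) (t + 1) : Int))) b with h | h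
      · left; exact h
      · right
        obtain ⟨t, htm, hte⟩ := List.mem_map.mp h
        exact ⟨t, List.mem_range.mp htm, hte.symm⟩
    rcases ih (pvRowMax park m r' b) with h0 | ⟨r, hrm, t, htm, he⟩
    · rcases hrow with h1 | ⟨t, htm, he⟩
      · left; calc pvGridMax park m b (r' :: rs)
            = pvGridMax park m (pvRowMax park m r' b) rs := rfl
          _ = pvRowMax park m r' b := h0
          _ = b := h1
      · right
        refine ⟨r', by simp, t, htm, ?_⟩
        calc pvGridMax park m b (r' :: rs)
            = pvGridMax park m (pvRowMax park m r' b) rs := rfl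
          _ = pvRowMax park m r' b := h0
          _ = _ := he
    · right; exact ⟨r, List.mem_cons_of_mem r' hrm, t, htm, he⟩

-- A's scan for a nonpositive size always hits at (0,0) when the park has a row and a column
theorem pvScanA_of_nonpos (park : List (List String)) (n m size : Int)
    (hn : 0 < n) (hm : 0 < m) (hs : size ≤ 0) : pvScanA park n m size = true := by
  unfold pvScanA
  rw [List.any_eq_true]
  refine ⟨0, ?_, ?_⟩
  · rw [PySem.List.mem_pyRange_one]; omega
  · rw [List.any_eq_true]
    refine ⟨0, ?_, ?_⟩
    · rw [PySem.List.mem_pyRange_one]; omega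
    · simp
      exact ⟨⟨by omega, by omega⟩, fun x hx0 hxs => absurd hxs (by omega : ¬ x < size)⟩

-- A's scan for a positive size is the top-left-cornered empty-square existential
theorem pvScanA_pos_iff (park : List (List String)) (size : Int) (hs : 1 ≤ size) :
    pvScanA park (park.length : Int) (((park.headD []).length : Nat) : Int) size = true ↔
      ∃ i j : Nat, i + size.toNat ≤ park.length ∧ j + size.toNat ≤ (park.headD []).length ∧
        ∀ x < size.toNat, ∀ y < size.toNat, pvC park (i + x) (j + y) = true := by
  unfold pvScanA
  simp only [List.any_eq_true, List.all_eq_true, PySem.List.mem_pyRange_one,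
    Bool.and_eq_true, Bool.not_eq_true', Bool.or_eq_false_iff, decide_eq_false_iff_not,
    not_lt]
  constructor
  · rintro ⟨i, ⟨h0i, hin⟩, j, ⟨h0j, hjm⟩, ⟨hbn, hbm⟩, hall⟩
    refine ⟨i.toNat, j.toNat, by omega, by omega, ?_⟩
    intro x hx y hy
    have h := hall ((i.toNat + x : Nat) : Int) ⟨by omega, by omega⟩
      ((j.toNat + y : Nat) : Int) ⟨by omega, by omega⟩
    unfold pvCellA at h
    rw [PySem.List.pyGetD_natCast, PySem.List.pyGetD_natCast] at h
    exact h
  · rintro ⟨i, j, hi, hj, hE⟩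
    refine ⟨(i : Int), ⟨by omega, by omega⟩, (j : Int), ⟨by omega, by omega⟩,
      ⟨by omega, by omega⟩, ?_⟩
    intro x ⟨hxl, hxr⟩ y ⟨hyl, hyr⟩
    have hx' : x = ((i + (x - (i:Int)).toNat : Nat) : Int) := by push_cast; omega
    have hy' : y = ((j + (y - (j:Int)).toNat : Nat) : Int) := by push_cast; omega
    rw [hx', hy']
    unfold pvCellA
    rw [PySem.List.pyGetD_natCast, PySem.List.pyGetD_natCast]
    exact hE _ (by omega) _ (by omega)

-- top-left existential ↔ bottom-right existential (the pvD form)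
theorem pvTL_iff_BR (park : List (List String)) (n m s : Nat) (hs : 1 ≤ s) :
    (∃ i j : Nat, i + s ≤ n ∧ j + s ≤ m ∧ ∀ x < s, ∀ y < s, pvC park (i + x) (j + y) = true) ↔
      ∃ I < n, ∃ J < m, s ≤ pvD park (I + 1) (J + 1) := by
  constructor
  · rintro ⟨i, j, hi, hj, hE⟩
    refine ⟨i + (s - 1), by omega, j + (s - 1), by omega, ?_⟩
    refine (pvD_ge_iff park s (i + (s - 1)) (j + (s - 1))).mpr ⟨by omega, by omega, ?_⟩
    intro x hx y hy
    have h := hE (s - 1 - x) (by omega) (s - 1 - y) (by omega)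
    have e2 : i + (s - 1) - x = i + (s - 1 - x) := by omega
    have e3 : j + (s - 1) - y = j + (s - 1 - y) := by omega
    rw [e2, e3]; exact h
  · rintro ⟨I, hI, J, hJ, hD⟩
    obtain ⟨h1, h2, hE⟩ := (pvD_ge_iff park s I J).mp hD
    refine ⟨I + 1 - s, J + 1 - s, by omega, by omega, ?_⟩
    intro x hx y hy
    have h := hE (s - 1 - x) (by omega) (s - 1 - y) (by omega)
    have e2 : I - (s - 1 - x) = I + 1 - s + x := by omega
    have e3 : J - (s - 1 - y) = J + 1 - s + y := by omega
    rw [e2, e3] at h; exact h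

-- the early-return scan over the sorted list is head-of-filter
theorem pvFindSome_guard (l : List Int) (p : Int → Bool) :
    l.findSome? (fun s => if p s then some s else none) = (l.filter p).head? := by
  induction l with
  | nil => rfl
  | cons x xs ih =>
    by_cases hx : p x = true
    · simp [hx]
    · simp only [Bool.not_eq_true] at hx
      simp [hx, ih]

-- descending first-hit = max of the filtered original list
theorem pvFindDesc_eq_max (l mats : List Int) (p : Int → Bool)
    (hperm : l.Perm mats) (hsort : l.Pairwise (fun a b => b ≤ a)) :
    (match l.findSome? (fun s => if p s then some s else none) with
      | some s => s | none => -1)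
    = (match PySem.List.max? (mats.filter p) (fun x => x) with
      | some v => v | none => -1) := by
  rw [pvFindSome_guard]
  have hpf : (l.filter p).Perm (mats.filter p) := hperm.filter p
  cases hf : l.filter p with
  | nil =>
    rw [hf] at hpf
    have hmn : mats.filter p = [] := hpf.symm.eq_nil
    rw [hmn, (PySem.List.max?_eq_none_iff _ _).mpr rfl]
    rfl
  | cons h t =>
    rw [hf] at hpf
    have hne : mats.filter p ≠ [] := by
      intro h0; rw [h0] at hpf; exact List.cons_ne_nil h t hpf.eq_nil
    obtain ⟨w, hw⟩ : ∃ w, PySem.List.max? (mats.filter p) (fun x => x) = some w := by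
      cases hmax : PySem.List.max? (mats.filter p) (fun x => x) with
      | none => exact absurd ((PySem.List.max?_eq_none_iff _ _).mp hmax) hne
      | some w => exact ⟨w, rfl⟩
    rw [hw]
    have hwmem : w ∈ mats.filter p := PySem.List.max?_mem hw
    have hwmax : ∀ y ∈ mats.filter p, y ≤ w := PySem.List.max?_isMax hw
    have hhm : h ∈ mats.filter p := hpf.subset (List.mem_cons_self)
    have hwht : w ∈ h :: t := hpf.mem_iff.mpr hwmem
    have hdesc : (l.filter p).Pairwise (fun a b => b ≤ a) := hsort.filter p
    rw [hf] at hdesc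
    have hth : ∀ y ∈ t, y ≤ h := (List.pairwise_cons.mp hdesc).1
    have hwh : w ≤ h := by
      rcases List.mem_cons.mp hwht with rfl | hwt
      · exact le_refl w
      · exact hth _ hwt
    have hhw : h ≤ w := hwmax h hhm
    simp [le_antisymm hhw hwh]

-- ===== VERDICT (by name: the statement is the Claim_ definition above) =====
theorem solution_spec : Claim_equal_solution := by
  unfold Claim_equal_solution
  intro mats park _hdom hpre
  unfold Spec_solution
  obtain ⟨hne, -⟩ := hpre
  simp only [solution, solution_alt]
  by_cases hm : (park.headD []).length = 0
  · rw [if_pos hm]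
    have hnone : (PySem.List.sorted mats (fun x => x) true).findSome?
        (fun size => if pvScanA park (park.length : Int) ((park.headD []).length : Int) size
          then some size else none) = none := by
      rw [List.findSome?_eq_none_iff]
      intro size _
      have hsc : pvScanA park (park.length : Int) ((park.headD []).length : Int) size = false := by
        unfold pvScanA
        rw [hm]
        simp [PySem.List.pyRange_one_eq_nil]
      rw [hsc]; simp
    rw [hnone]
  · have hm' : 0 < (park.headD []).length := Nat.pos_of_ne_zero hm
    have hn : 0 < park.length := by
      cases park with
      | nil => exact absurd rfl hne
      | cons a l => simp
    have hinit : (List.range (park.headD []).length).map (fun t => (pvD park 0 (t + 1) : Int))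
        = List.replicate (park.headD []).length (0 : Int) := by
      have hz : ∀ t : Nat, (pvD park 0 (t + 1) : Int) = 0 := fun t => by
        rw [pvD_zero_left]; rfl
      simp only [hz]
      simp
    have hfold := pvFold_spec park (park.headD []).length park 0 0 (le_refl 0) rfl
    rw [hinit] at hfold
    simp only [Nat.zero_add] at hfold
    rw [if_neg hm, hfold]
    set best := pvGridMax park (park.headD []).length 0 (List.range' 0 park.length) with hbd
    have hb0 : 0 ≤ best := le_pvGridMax park _ _ 0
    have hchar : ∀ sN : Nat, 1 ≤ sN →
        ((∃ I < park.length, ∃ J < (park.headD []).length, sN ≤ pvD park (I + 1) (J + 1)) ↔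
          (sN : Int) ≤ best) := by
      intro sN hsN
      constructor
      · rintro ⟨I, hI, J, hJ, hD⟩
        calc (sN : Int) ≤ (pvD park (I + 1) (J + 1) : Int) := by exact_mod_cast hD
          _ ≤ best := pvGridMax_ub park _ _ 0 I (by rw [List.mem_range'_1]; omega) J hJ
      · intro hle
        rcases pvGridMax_mem park (park.headD []).length (List.range' 0 park.length) 0
          with h0 | ⟨r, hr, t, ht, he⟩
        · rw [← hbd] at h0
          rw [h0] at hle; omega
        · rw [← hbd] at he
          refine ⟨r, ?_, t, ht, ?_⟩
          · rw [List.mem_range'_1] at hr; omega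
          · rw [he] at hle; exact_mod_cast hle
    have hfun : (fun size => if pvScanA park (park.length : Int) ((park.headD []).length : Int) size
          then some size else none)
        = (fun size => if decide (size ≤ best) = true then some size else none) := by
      funext size
      by_cases hsz : size ≤ 0
      · rw [if_pos (pvScanA_of_nonpos park (park.length : Int) ((park.headD []).length : Int) size
            (by exact_mod_cast hn) (by exact_mod_cast hm') hsz),
          if_pos (by simp only [decide_eq_true_eq]; omega)]
      · have hs1 : (1 : Int) ≤ size := by omega
        have hiff : (pvScanA park (park.length : Int) ((park.headD []).length : Int) size = true)
            ↔ (size ≤ best) := by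
          rw [pvScanA_pos_iff park size hs1,
            pvTL_iff_BR park park.length (park.headD []).length size.toNat (by omega),
            hchar size.toNat (by omega), Int.toNat_of_nonneg (by omega : (0 : Int) ≤ size)]
        by_cases hq : size ≤ best
        · rw [if_pos (hiff.mpr hq), if_pos (by simpa using hq)]
        · rw [if_neg (fun h => hq (hiff.mp h)), if_neg (by simpa using hq)]
    rw [hfun, pvFindDesc_eq_max (PySem.List.sorted mats (fun x => x) true) mats
      (fun s => decide (s ≤ best)) (PySem.List.sorted_perm mats (fun x => x) true)
      (by simpa using PySem.List.sorted_pairwise_rev mats (fun x => x))]
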